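-- pv_equiv track=rewrite | github.com/alihansultan/aka | TasarimPython/TasarimPython/TasarimPython.py | enKucuk_Hucre
-- ===== SOURCE A (Python) =====
-- def enKucuk_Hucre(tablo):
--     # Varsayılanı sonsuz olarak ayarla.
--     min_hucre = float("inf")
--     x, y = -1, -1
--
--     # Her hücreye gidip, en küçük olanı ara.
--     for i in range(len(tablo)):
--         for j in range(len(tablo[i])):
--             if tablo[i][j] < min_hucre:
--                 min_hucre = tablo[i][j]
--                 x, y = i, j
--
--     # Hücrenin x ve y koordinatlarını döndür.
--     return x, y
-- ===== SOURCE B (Python) =====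
-- def enKucuk_Hucre(tablo):
--     # Pass 1: per-row minimum value and column of its first occurrence (skip empty rows).
--     satir_minlari = []
--     for i, satir in enumerate(tablo):
--         if satir:
--             m, jm = satir[0], 0
--             for j in range(1, len(satir)):
--                 if satir[j] < m:
--                     m, jm = satir[j], j
--             satir_minlari.append((m, i, jm))
--     # Pass 2: smallest row-minimum, earliest row wins on ties.
--     en_kucuk = None
--     x, y = -1, -1
--     for m, i, j in satir_minlari:
--         if en_kucuk is None or m < en_kucuk:
--             en_kucuk = m
--             x, y = i, j
--     return x, y
-- ===== Notes on version B (the rewrite author's own statement) =====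
-- stated objective: alternative
-- what changed: Replaces A's single row-major scan of every cell against one global running minimum by a two-pass decomposition: first compute each nonempty row's (min, first column) entry, then combine those per-row entries with a second strict-< scan.
import Mathlib
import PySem

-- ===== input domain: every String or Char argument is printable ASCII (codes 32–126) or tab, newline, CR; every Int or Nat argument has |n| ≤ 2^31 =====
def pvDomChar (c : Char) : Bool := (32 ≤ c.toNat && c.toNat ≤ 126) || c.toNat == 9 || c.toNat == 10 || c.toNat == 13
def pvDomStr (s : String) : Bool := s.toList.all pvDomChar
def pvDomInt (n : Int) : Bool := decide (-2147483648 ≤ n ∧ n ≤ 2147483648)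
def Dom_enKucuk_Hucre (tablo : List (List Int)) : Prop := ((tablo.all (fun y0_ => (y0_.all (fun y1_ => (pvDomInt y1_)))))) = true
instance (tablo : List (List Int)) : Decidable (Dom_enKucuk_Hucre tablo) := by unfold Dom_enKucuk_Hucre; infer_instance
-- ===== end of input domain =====

-- B replaces A's single row-major cell scan by a two-pass decomposition (per-row minima, then
-- combine the rows); same cost, alternative structure.


-- ===== PORT A =====
-- A's cell step: 'if tablo[i][j] < min_hucre: …' with min_hucre = float("inf") modelled as none.
def pvStepA (i : Int) : Option Int × Int × Int → Int × Int → Option Int × Int × Int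
  | (none, _, _), q => (some q.2, i, q.1)
  | (some m, x, y), q => if q.2 < m then (some q.2, i, q.1) else (some m, x, y)

def enKucuk_Hucre (tablo : List (List Int)) : Int × Int :=
  let st := (PySem.List.enumerate tablo 0).foldl
    (fun st p => (PySem.List.enumerate p.2 0).foldl (pvStepA p.1) st)
    ((none : Option Int), (-1 : Int), (-1 : Int))
  (st.2.1, st.2.2)

-- ===== PORT B =====
-- B pass 1 inner loop: running (row minimum, first column) with strict '<'.
def pvPairStep (s : Int × Int) (q : Int × Int) : Int × Int :=
  if q.2 < s.1 then (q.2, q.1) else s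

-- per-row minimum and the column of its first occurrence; none for an empty row
def pvRowMin (row : List Int) : Option (Int × Int) :=
  match row with
  | [] => none
  | h :: t => some ((PySem.List.enumerate t 1).foldl pvPairStep (h, 0))

-- B pass 2 step: 'if en_kucuk is None or m < en_kucuk: …'
def pvStepB : Option Int × Int × Int → Int × Int × Int → Option Int × Int × Int
  | (none, _, _), e => (some e.1, e.2.1, e.2.2)
  | (some b, x, y), e => if e.1 < b then (some e.1, e.2.1, e.2.2) else (some b, x, y)

def enKucuk_Hucre_alt (tablo : List (List Int)) : Int × Int :=
  let satirMinlari := (PySem.List.enumerate tablo 0).filterMap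
    (fun p => (pvRowMin p.2).map (fun mj => (mj.1, p.1, mj.2)))
  let st := satirMinlari.foldl pvStepB ((none : Option Int), (-1 : Int), (-1 : Int))
  (st.2.1, st.2.2)

-- ===== PRECONDITION & SPEC =====
def Spec_enKucuk_Hucre (tablo : List (List Int)) (out : Int × Int) : Prop := out = enKucuk_Hucre_alt tablo
instance (tablo : List (List Int)) (out : Int × Int) : Decidable (Spec_enKucuk_Hucre tablo out) := by unfold Spec_enKucuk_Hucre; infer_instance

-- ===== CLAIM (what is proved, stated in full; the proofs are below) =====
def Claim_equal_enKucuk_Hucre : Prop := ∀ (tablo : List (List Int)), Dom_enKucuk_Hucre tablo → Spec_enKucuk_Hucre tablo (enKucuk_Hucre tablo)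

-- ===== LEMMAS AND PROOFS =====

theorem pvStepA_none (i x y : Int) (q : Int × Int) :
    pvStepA i (none, x, y) q = (some q.2, i, q.1) := rfl

theorem pvStepA_some (i m x y : Int) (q : Int × Int) :
    pvStepA i (some m, x, y) q = if q.2 < m then (some q.2, i, q.1) else (some m, x, y) := rfl

theorem pvStepB_none (x y : Int) (e : Int × Int × Int) :
    pvStepB (none, x, y) e = (some e.1, e.2.1, e.2.2) := rfl

theorem pvStepB_some (b x y : Int) (e : Int × Int × Int) :
    pvStepB (some b, x, y) e = if e.1 < b then (some e.1, e.2.1, e.2.2) else (some b, x, y) := rfl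

-- proof-only: fold of pvPairStep lifted to an optional (min, argmin) state
def pvOptStep (o : Option (Int × Int)) (q : Int × Int) : Option (Int × Int) :=
  match o with
  | none => some (q.2, q.1)
  | some s => some (pvPairStep s q)

def pvMinFold (l : List (Int × Int)) : Option (Int × Int) := l.foldl pvOptStep none

theorem pvFoldSome (l : List (Int × Int)) (s : Int × Int) :
    l.foldl pvOptStep (some s) = some (l.foldl pvPairStep s) := by
  induction l generalizing s with
  | nil => rfl
  | cons q l ih => simp only [List.foldl_cons, pvOptStep, ih]

theorem pvPairMin_char (l : List (Int × Int)) (s : Int × Int) :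
    l.foldl pvPairStep s =
      (match pvMinFold l with
        | none => s
        | some p => if p.1 < s.1 then p else s) := by
  induction l generalizing s with
  | nil => rfl
  | cons q l ih =>
    have hmf : pvMinFold (q :: l) = some (l.foldl pvPairStep (q.2, q.1)) := by
      simp only [pvMinFold, List.foldl_cons, pvOptStep, pvFoldSome]
    simp only [List.foldl_cons]
    rw [hmf, ih (pvPairStep s q), ih (q.2, q.1)]
    cases hml : pvMinFold l with
    | none => simp only [pvPairStep]
    | some p =>
      simp only [pvPairStep]
      split_ifs <;> first | rfl | omega

-- A's inner loop over one row's cells equals one pvStepB application of the row's minimum entry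
theorem pvInnerA_char (l : List (Int × Int)) (i : Int) (st : Option Int × Int × Int) :
    l.foldl (pvStepA i) st =
      (match pvMinFold l with
        | none => st
        | some p => pvStepB st (p.1, i, p.2)) := by
  induction l generalizing st with
  | nil => rfl
  | cons q l ih =>
    have hmf : pvMinFold (q :: l) = some (l.foldl pvPairStep (q.2, q.1)) := by
      simp only [pvMinFold, List.foldl_cons, pvOptStep, pvFoldSome]
    simp only [List.foldl_cons, ih, hmf]
    rw [pvPairMin_char]
    cases hml : pvMinFold l with
    | none =>
      obtain ⟨om, x, y⟩ := st
      cases om <;>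
        simp only [pvStepA_none, pvStepA_some, pvStepB_none, pvStepB_some] <;>
        (try split_ifs) <;>
        (try simp only [pvStepA_none, pvStepA_some, pvStepB_none, pvStepB_some]) <;>
        (try split_ifs) <;> first | rfl | omega
    | some p =>
      obtain ⟨om, x, y⟩ := st
      cases om <;>
        simp only [pvStepA_none, pvStepA_some, pvStepB_none, pvStepB_some] <;>
        (try split_ifs) <;>
        (try simp only [pvStepA_none, pvStepA_some, pvStepB_none, pvStepB_some]) <;>
        (try split_ifs) <;> first | rfl | omega

theorem pvRowMin_eq_minFold (row : List Int) :
    pvMinFold (PySem.List.enumerate row 0) = pvRowMin row := by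
  cases row with
  | nil => rfl
  | cons h t =>
    simp only [pvRowMin, pvMinFold, PySem.List.enumerate_cons, List.foldl_cons, pvOptStep,
      pvFoldSome]
    norm_num

theorem pvOuter_eq (tablo : List (List Int)) (k : Int) (st : Option Int × Int × Int) :
    (PySem.List.enumerate tablo k).foldl
        (fun st p => (PySem.List.enumerate p.2 0).foldl (pvStepA p.1) st) st =
      ((PySem.List.enumerate tablo k).filterMap
          (fun p => (pvRowMin p.2).map (fun mj => (mj.1, p.1, mj.2)))).foldl pvStepB st := by
  induction tablo generalizing k st with
  | nil => rfl
  | cons row rest ih =>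
    simp only [PySem.List.enumerate_cons, List.foldl_cons, List.filterMap_cons]
    rw [pvInnerA_char, pvRowMin_eq_minFold]
    cases hr : pvRowMin row with
    | none => simpa using ih (k + 1) st
    | some mj => simpa using ih (k + 1) (pvStepB st (mj.1, k, mj.2))

-- ===== VERDICT (by name: the statement is the Claim_ definition above) =====
theorem enKucuk_Hucre_spec : Claim_equal_enKucuk_Hucre := by
  intro tablo _
  unfold Spec_enKucuk_Hucre enKucuk_Hucre enKucuk_Hucre_alt
  rw [pvOuter_eq]
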